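-- pv_equiv track=rewrite | github.com/qn06142/coding-python | giveaway.py | count_lucky_pairs
-- ===== SOURCE A (Python) =====
-- def count_lucky_pairs(n, a, b):
--
--     d = [a[i] - b[i] for i in range(n)]
--
--     d.sort()
--
--     count = 0
--
--     i, j = 0, n - 1
--     while i < j:
--         if d[i] + d[j] > 0:
--             count += j - i
--             j -= 1
--         else:
--             i += 1
--
--     return count
-- ===== SOURCE B (Python) =====
-- def count_lucky_pairs(n, a, b):
--     d = sorted(a[i] - b[i] for i in range(n))
--     m = len(d)
--     total = 0
--     for i in range(m):
--         x = -d[i]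
--         lo, hi = 0, m
--         while lo < hi:
--             mid = (lo + hi) // 2
--             if d[mid] <= x:
--                 lo = mid + 1
--             else:
--                 hi = mid
--         total += m - max(i + 1, lo)
--     return total
-- ===== Notes on version B (the rewrite author's own statement) =====
-- stated objective: alternative
-- what changed: Replaces the converging two-pointer scan over the sorted differences by a per-element binary search (hand-written bisect_right) that counts, for each i, how many partners j>i satisfy d[i]+d[j]>0.
import Mathlib
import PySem

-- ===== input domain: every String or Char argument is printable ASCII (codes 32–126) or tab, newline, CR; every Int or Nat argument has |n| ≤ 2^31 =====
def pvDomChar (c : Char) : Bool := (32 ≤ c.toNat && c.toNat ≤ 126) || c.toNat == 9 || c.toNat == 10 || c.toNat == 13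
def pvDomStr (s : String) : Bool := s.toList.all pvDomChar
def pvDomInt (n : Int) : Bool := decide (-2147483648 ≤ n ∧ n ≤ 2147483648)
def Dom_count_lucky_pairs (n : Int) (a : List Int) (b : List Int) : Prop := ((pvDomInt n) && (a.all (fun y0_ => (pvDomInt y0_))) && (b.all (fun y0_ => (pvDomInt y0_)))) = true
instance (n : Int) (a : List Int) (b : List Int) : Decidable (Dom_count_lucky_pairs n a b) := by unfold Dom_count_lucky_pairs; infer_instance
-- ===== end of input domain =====

-- B replaces A's converging two-pointer scan over the sorted differences by a per-element
-- hand-written binary search counting, for each i, the partners j > i with d[i]+d[j] > 0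
-- (an alternative algorithm of the same cost).


-- ===== PORT A =====
-- the two-pointer while-loop: i, j converge on the sorted difference list
def clpLoop (s : List Int) (i j count : Int) : Int :=
  if _h : i < j then
    if PySem.List.pyGetD s i 0 + PySem.List.pyGetD s j 0 > 0 then
      clpLoop s i (j - 1) (count + (j - i))
    else
      clpLoop s (i + 1) j count
  else count
termination_by (j - i).toNat
decreasing_by
  · omega
  · omega

def count_lucky_pairs (n : Int) (a : List Int) (b : List Int) : Int :=
  let d := (PySem.List.pyRange 0 n 1).map
    (fun i => PySem.List.pyGetD a i 0 - PySem.List.pyGetD b i 0)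
  let d := PySem.List.sorted d (fun v => v)
  clpLoop d 0 (n - 1) 0

-- ===== PORT B =====
-- hand-written bisect_right on d for x: first position whose element exceeds x
def bsLoop (s : List Int) (x lo hi : Int) : Int :=
  if h : lo < hi then
    let mid := PySem.Int.floordiv (lo + hi) 2
    if PySem.List.pyGetD s mid 0 ≤ x then
      bsLoop s x (mid + 1) hi
    else
      bsLoop s x lo mid
  else lo
termination_by (hi - lo).toNat
decreasing_by
  · have hb := PySem.Int.floordiv_two_mid_bounds (le_of_lt h)
    omega
  · have hlt := (PySem.Int.floordiv_lt_iff_lt_mul (by omega : (0:ℤ) < 2)).mpr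
      (by omega : lo + hi < hi * 2)
    omega

def count_lucky_pairs_alt (n : Int) (a : List Int) (b : List Int) : Int :=
  let d := PySem.List.sorted
    ((PySem.List.pyRange 0 n 1).map
      (fun i => PySem.List.pyGetD a i 0 - PySem.List.pyGetD b i 0))
    (fun v => v)
  let m : Int := d.length
  (PySem.List.pyRange 0 m 1).foldl
    (fun total i =>
      total + (m - max (i + 1) (bsLoop d (-(PySem.List.pyGetD d i 0)) 0 m))) 0

-- ===== PRECONDITION & SPEC =====
-- Pre_ excludes exactly the inputs where Python A raises IndexError: some i in range(n)
-- with a[i] or b[i] out of range (B raises identically there).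
def Pre_count_lucky_pairs (n : Int) (a : List Int) (b : List Int) : Prop :=
  n ≤ (a.length : Int) ∧ n ≤ (b.length : Int)
instance (n : Int) (a : List Int) (b : List Int) : Decidable (Pre_count_lucky_pairs n a b) := by
  unfold Pre_count_lucky_pairs; infer_instance

def pvWitness_count_lucky_pairs : Int × List Int × List Int := (3, [1, 2, -4], [0, 5, -6])

def Spec_count_lucky_pairs (n : Int) (a : List Int) (b : List Int) (out : Int) : Prop := out = count_lucky_pairs_alt n a b
instance (n : Int) (a : List Int) (b : List Int) (out : Int) : Decidable (Spec_count_lucky_pairs n a b out) := by unfold Spec_count_lucky_pairs; infer_instance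

-- ===== CLAIM (what is proved, stated in full; the proofs are below) =====
def Claim_equal_count_lucky_pairs : Prop := ∀ (n : Int) (a : List Int) (b : List Int), Dom_count_lucky_pairs n a b → Pre_count_lucky_pairs n a b → Spec_count_lucky_pairs n a b (count_lucky_pairs n a b)

-- ===== LEMMAS AND PROOFS =====

-- element access used by the proofs (Nat index, default 0)
def pvG (s : List Int) (k : Nat) : Int := s.getD k 0
-- 0/1 indicator of a lucky pair of positions
def pvF (s : List Int) (p q : Nat) : Int := if 0 < pvG s p + pvG s q then 1 else 0
-- number of lucky pairs with i ≤ p < q ≤ j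
def pvW (s : List Int) (i j : Nat) : Int :=
  ∑ q ∈ Finset.Ico i (j + 1), ∑ p ∈ Finset.Ico i q, pvF s p q

theorem pvG_mono {s : List Int} (hs : s.Pairwise (· ≤ ·)) {p q : Nat}
    (hpq : p ≤ q) (hq : q < s.length) : pvG s p ≤ pvG s q := by
  rcases eq_or_lt_of_le hpq with h | h
  · subst h; exact le_refl _
  · have hp : p < s.length := lt_trans h hq
    have := List.pairwise_iff_getElem.mp hs p q hp hq h
    simpa [pvG, List.getD_eq_getElem?_getD, List.getElem?_eq_getElem, hp, hq] using this

theorem pvGetD_eq {s : List Int} {i : Int} (h0 : 0 ≤ i) (h1 : i < s.length) :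
    PySem.List.pyGetD s i 0 = pvG s i.toNat := by
  have hn : i.toNat < s.length := by omega
  rw [PySem.List.pyGetD_eq_getElem s 0 h0 h1]
  simp [pvG, List.getD_eq_getElem?_getD, hn]

theorem clpLoop_eq {s : List Int} (hs : s.Pairwise (· ≤ ·)) :
    ∀ (k : Nat) (i j c : Int), 0 ≤ i → i ≤ j → j < s.length → (j - i).toNat = k →
      clpLoop s i j c = c + pvW s i.toNat j.toNat := by
  intro k
  induction k with
  | zero =>
    intro i j c h0 hij hjl hk
    rw [clpLoop, dif_neg (by omega : ¬ i < j)]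
    have hz : pvW s i.toNat j.toNat = 0 := by
      have hji : j.toNat = i.toNat := by omega
      rw [hji]
      unfold pvW
      apply Finset.sum_eq_zero
      intro q hq
      have hq' : q = i.toNat := by rw [Finset.mem_Ico] at hq; omega
      subst hq'
      simp
    rw [hz]; ring
  | succ k ih =>
    intro i j c h0 hij hjl hk
    have hlt : i < j := by omega
    have hgi := pvGetD_eq (s := s) h0 (by omega : i < (s.length : Int))
    have hgj := pvGetD_eq (s := s) (by omega : (0:Int) ≤ j) hjl
    have hnil : i.toNat < j.toNat := by omega
    have hjlen : j.toNat < s.length := by omega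
    rw [clpLoop, dif_pos hlt]
    by_cases hc : PySem.List.pyGetD s i 0 + PySem.List.pyGetD s j 0 > 0
    · rw [if_pos hc]
      rw [ih i (j - 1) (c + (j - i)) h0 (by omega) (by omega) (by omega)]
      have h1 : (j - 1).toNat = j.toNat - 1 := by omega
      rw [h1]
      have hcg : 0 < pvG s i.toNat + pvG s j.toNat := by
        rw [hgi, hgj] at hc; omega
      have hsplit : pvW s i.toNat j.toNat =
          pvW s i.toNat (j.toNat - 1) + ((j.toNat : Int) - (i.toNat : Int)) := by
        unfold pvW
        have e1 : j.toNat - 1 + 1 = j.toNat := by omega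
        rw [e1, Finset.sum_Ico_succ_top (by omega : i.toNat ≤ j.toNat)]
        have hall : ∀ p ∈ Finset.Ico i.toNat j.toNat, pvF s p j.toNat = 1 := by
          intro p hp
          rw [Finset.mem_Ico] at hp
          have hmono := pvG_mono hs hp.1 (by omega : p < s.length)
          unfold pvF
          rw [if_pos (by omega)]
        rw [Finset.sum_congr rfl hall, Finset.sum_const, Nat.card_Ico,
          nsmul_eq_mul, mul_one]
        push_cast [Nat.cast_sub (le_of_lt hnil)]
        ring
      rw [hsplit]
      have : ((j.toNat : Int) - (i.toNat : Int)) = j - i := by omega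
      rw [this]; ring
    · rw [if_neg hc]
      rw [ih (i + 1) j c (by omega) (by omega) hjl (by omega)]
      have h1 : (i + 1).toNat = i.toNat + 1 := by omega
      rw [h1]
      have hcg : ¬ 0 < pvG s i.toNat + pvG s j.toNat := by
        rw [hgi, hgj] at hc; omega
      have hsplit : pvW s i.toNat j.toNat = pvW s (i.toNat + 1) j.toNat := by
        unfold pvW
        rw [Finset.sum_eq_sum_Ico_succ_bot (by omega : i.toNat < j.toNat + 1)]
        simp only [Finset.Ico_self, Finset.sum_empty, zero_add]
        apply Finset.sum_congr rfl
        intro q hq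
        rw [Finset.mem_Ico] at hq
        rw [Finset.sum_eq_sum_Ico_succ_bot (by omega : i.toNat < q)]
        have hq0 : pvF s i.toNat q = 0 := by
          have hmono := pvG_mono hs (by omega : q ≤ j.toNat) hjlen
          unfold pvF
          rw [if_neg (by omega)]
        rw [hq0, zero_add]
      rw [hsplit]

theorem bsLoop_spec {s : List Int} (hs : s.Pairwise (· ≤ ·)) :
    ∀ (k : Nat) (x lo hi : Int), 0 ≤ lo → lo ≤ hi → hi ≤ (s.length : Int) →
      (∀ p : Nat, (p : Int) < lo → pvG s p ≤ x) →
      (∀ q : Nat, hi ≤ (q : Int) → q < s.length → x < pvG s q) →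
      (hi - lo).toNat = k →
      0 ≤ bsLoop s x lo hi ∧ bsLoop s x lo hi ≤ (s.length : Int) ∧
        (∀ p : Nat, (p : Int) < bsLoop s x lo hi → pvG s p ≤ x) ∧
        (∀ q : Nat, bsLoop s x lo hi ≤ (q : Int) → q < s.length → x < pvG s q) := by
  intro k
  induction k using Nat.strong_induction_on with
  | _ k ih =>
    intro x lo hi h0 hlh hhl hlow hhigh hk
    rw [bsLoop]
    by_cases hcmp : lo < hi
    · simp only [dif_pos hcmp]
      have hmid := PySem.Int.floordiv_two_mid_bounds (le_of_lt hcmp)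
      set mid := PySem.Int.floordiv (lo + hi) 2 with hmdef
      have hmlt : mid < hi :=
        (PySem.Int.floordiv_lt_iff_lt_mul (by omega : (0:ℤ) < 2)).mpr (by omega)
      have hmlen : mid < (s.length : Int) := by omega
      have hg := pvGetD_eq (s := s) (by omega : (0:Int) ≤ mid) hmlen
      by_cases hle : PySem.List.pyGetD s mid 0 ≤ x
      · rw [if_pos hle]
        refine ih (hi - (mid + 1)).toNat (by omega) x (mid + 1) hi (by omega) (by omega)
          hhl ?_ hhigh rfl
        intro p hp
        have hple : p ≤ mid.toNat := by omega
        have := pvG_mono hs hple (by omega : mid.toNat < s.length)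
        rw [hg] at hle
        omega
      · rw [if_neg hle]
        refine ih (mid - lo).toNat (by omega) x lo mid h0 (by omega) (by omega)
          hlow ?_ rfl
        intro q hq hql
        have := pvG_mono hs (by omega : mid.toNat ≤ q) hql
        rw [hg] at hle
        omega
    · rw [dif_neg hcmp]
      exact ⟨h0, by omega, fun p hp => hlow p hp, fun q hq hql => hhigh q (by omega) hql⟩

theorem perI_eq {s : List Int} (hs : s.Pairwise (· ≤ ·)) (i : Nat) (hi : i < s.length) :
    (s.length : Int) - max ((i : Int) + 1) (bsLoop s (-(pvG s i)) 0 (s.length : Int)) =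
      ∑ q ∈ Finset.Ico (i + 1) s.length, pvF s i q := by
  obtain ⟨hr0, hrm, hlowr, hhighr⟩ :=
    bsLoop_spec hs ((s.length : Int) - 0).toNat (-(pvG s i)) 0 (s.length : Int)
      (le_refl 0) (by omega) (le_refl _)
      (fun p hp => by omega)
      (fun q hq hql => by omega)
      rfl
  set r := bsLoop s (-(pvG s i)) 0 (s.length : Int) with hrdef
  have hcong : ∀ q ∈ Finset.Ico (i + 1) s.length,
      pvF s i q = if r.toNat ≤ q then (1 : ℤ) else 0 := by
    intro q hq
    rw [Finset.mem_Ico] at hq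
    by_cases hge : r.toNat ≤ q
    · have := hhighr q (by omega) hq.2
      unfold pvF
      rw [if_pos (by omega), if_pos hge]
    · have := hlowr q (by omega)
      unfold pvF
      rw [if_neg (by omega), if_neg hge]
  rw [Finset.sum_congr rfl hcong, Finset.sum_boole, Finset.Ico_filter_le, Nat.card_Ico]
  have hmax : max (i + 1) r.toNat ≤ s.length := by omega
  omega

-- ===== VERDICT (by name: the statement is the Claim_ definition above) =====
theorem count_lucky_pairs_spec : Claim_equal_count_lucky_pairs := by
  intro n a b _dom _pre
  unfold Spec_count_lucky_pairs
  simp only [count_lucky_pairs, count_lucky_pairs_alt]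
  set d0 := (PySem.List.pyRange 0 n 1).map
    (fun i => PySem.List.pyGetD a i 0 - PySem.List.pyGetD b i 0) with hd0
  set s := PySem.List.sorted d0 (fun v => v) with hsdef
  have hs : s.Pairwise (· ≤ ·) := PySem.List.sorted_pairwise d0 (fun v => v)
  have hlen : s.length = n.toNat := by
    rw [hsdef, PySem.List.length_sorted, hd0, List.length_map,
      PySem.List.length_pyRange_one]
    omega
  -- B side: the fold over range(m) is the triangle sum of pair indicators
  rw [PySem.List.foldl_add, PySem.List.pyRange_zero_natCast s.length, List.map_map]
  rw [zero_add]
  rw [show ((List.range s.length).map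
      ((fun i => (s.length : Int) -
          max (i + 1) (bsLoop s (-(PySem.List.pyGetD s i 0)) 0 (s.length : Int))) ∘
        (fun k : ℕ => (k : Int)))).sum
      = ∑ k ∈ Finset.range s.length,
          ((s.length : Int) -
            max ((k : Int) + 1) (bsLoop s (-(PySem.List.pyGetD s (k : Int) 0)) 0 (s.length : Int)))
      from rfl]
  have hB : ∀ k ∈ Finset.range s.length,
      ((s.length : Int) -
        max ((k : Int) + 1) (bsLoop s (-(PySem.List.pyGetD s (k : Int) 0)) 0 (s.length : Int)))
      = ∑ q ∈ Finset.Ico (k + 1) s.length, pvF s k q := by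
    intro k hk
    rw [Finset.mem_range] at hk
    rw [PySem.List.pyGetD_natCast]
    have : s.getD k 0 = pvG s k := rfl
    rw [this, perI_eq hs k hk]
  rw [Finset.sum_congr rfl hB, Finset.range_eq_Ico, Finset.sum_Ico_Ico_comm' 0 s.length]
  -- A side
  by_cases hn : 0 < n
  · have hj : (n - 1 : Int) < (s.length : Int) := by omega
    rw [clpLoop_eq hs ((n - 1) - 0).toNat 0 (n - 1) 0 (le_refl 0) (by omega) hj rfl]
    have e0 : (0 : Int).toNat = 0 := rfl
    have e1 : (n - 1 : Int).toNat + 1 = s.length := by omega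
    rw [e0]
    unfold pvW
    rw [e1, zero_add]
  · have hs0 : s.length = 0 := by omega
    rw [clpLoop, dif_neg (by omega : ¬ (0:Int) < n - 1), hs0]
    simp
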